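-- pv_equiv track=rewrite | github.com/patkamon/band-assignment | revenge.py | revenge
-- ===== SOURCE A (Python) =====
-- def revenge(string):
--     shot = 0
--     # if shoot first or endup with no revenge that just return bad boy
--     if string[0] == "R" or string[-1] == "S":
--         return "Bad boy"
--
--     for i in range(len(string)):
--         # if found r then decease the shot count
--         # not decease in case we revenge more than baby's shot
--         if string[i] == "R" and shot >0:
--             shot -=1
--         # if found s increase shot
--         elif string[i] == "S":
--             shot +=1
--
--     # if there're shot left
--     if shot >0:
--         return  "Bad boy"
--     return "Good boy"
-- ===== SOURCE B (Python) =====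
-- def revenge(string):
--     if string[0] == "R" or string[-1] == "S":
--         return "Bad boy"
--     s = 0
--     for ch in reversed(string):
--         if ch == "S":
--             s += 1
--         elif ch == "R":
--             s -= 1
--         if s > 0:
--             return "Bad boy"
--     return "Good boy"
-- ===== Notes on version B (the rewrite author's own statement) =====
-- stated objective: alternative
-- what changed: Instead of maintaining A's clamped-at-zero counter to the end, B scans the string back-to-front with a raw running suffix sum and returns 'Bad boy' as soon as some suffix has more S than R (early exit), using the fact that A's final clamped counter is positive exactly when some suffix sum is positive.
import Mathlib
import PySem

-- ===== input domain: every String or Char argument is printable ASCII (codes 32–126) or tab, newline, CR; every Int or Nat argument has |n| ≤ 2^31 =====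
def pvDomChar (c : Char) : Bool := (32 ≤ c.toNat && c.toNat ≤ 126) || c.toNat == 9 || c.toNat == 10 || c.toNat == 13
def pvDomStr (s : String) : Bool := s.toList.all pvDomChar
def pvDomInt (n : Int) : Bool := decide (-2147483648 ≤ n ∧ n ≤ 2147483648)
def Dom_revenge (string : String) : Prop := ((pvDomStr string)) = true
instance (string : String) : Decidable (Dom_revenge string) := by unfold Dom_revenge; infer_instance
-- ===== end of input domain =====

-- B scans the string back-to-front looking for a suffix with more S than R, with early exit,
-- instead of A's left-to-right clamped counter (alternative algorithm, same cost).
-- Both programs raise IndexError on the empty string, hence Pre_ excludes it.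

-- ===== PORT A =====
-- loop body of A: conditional decrement (clamp at zero) / increment
def revengeStepA (shot : Int) (c : Char) : Int :=
  if c == 'R' && shot > 0 then shot - 1
  else if c == 'S' then shot + 1
  else shot

-- string[0] / string[-1]: Python raises IndexError on the empty string (excluded by Pre_);
-- inside Pre_ the defaulted lookup pyGetD is exact.
def revenge (string : String) : String :=
  if PySem.List.pyGetD string.toList 0 ' ' == 'R' || PySem.List.pyGetD string.toList (-1) ' ' == 'S' then "Bad boy"
  else
    -- for i in range(len(string)): inspect string[i]; transliterated as a fold over the characters
    let shot : Int := string.toList.foldl revengeStepA 0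
    if shot > 0 then "Bad boy" else "Good boy"

-- ===== PORT B =====
-- B's loop over reversed(string): raw running suffix sum s, early return on s > 0
def revengeSuffix : Int → List Char → Bool
  | _, [] => false
  | s, c :: t =>
    let s' := if c == 'S' then s + 1 else if c == 'R' then s - 1 else s
    if s' > 0 then true else revengeSuffix s' t

-- same two guards as A (Python raises IndexError on the empty string, excluded by Pre_)
def revenge_alt (string : String) : String :=
  if PySem.List.pyGetD string.toList 0 ' ' == 'R' || PySem.List.pyGetD string.toList (-1) ' ' == 'S' then "Bad boy"
  else if revengeSuffix 0 string.toList.reverse then "Bad boy" else "Good boy"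

-- ===== PRECONDITION & SPEC =====
-- Pre_ excludes only the empty string, on which Python A raises IndexError at string[0].
def Pre_revenge (string : String) : Prop := string ≠ ""
instance (string : String) : Decidable (Pre_revenge string) := by unfold Pre_revenge; infer_instance
def pvWitness_revenge : String := "SR"

def Spec_revenge (string : String) (out : String) : Prop := out = revenge_alt string
instance (string : String) (out : String) : Decidable (Spec_revenge string out) := by unfold Spec_revenge; infer_instance

-- ===== CLAIM (what is proved, stated in full; the proofs are below) =====
def Claim_equal_revenge : Prop := ∀ (string : String), Dom_revenge string → Pre_revenge string → Spec_revenge string (revenge string)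

-- ===== LEMMAS AND PROOFS =====

-- per-character contribution
def pvDelta (c : Char) : Int := if c == 'S' then 1 else if c == 'R' then -1 else 0

def pvDsum (l : List Char) : Int := (l.map pvDelta).sum

-- max over all suffixes (including the empty one) of the suffix sum
def pvMsuf : List Char → Int
  | [] => 0
  | c :: t => max (pvDelta c + pvDsum t) (pvMsuf t)

-- max over all prefixes (including the empty one) of the prefix sum
def pvMpre : List Char → Int
  | [] => 0
  | c :: t => max 0 (pvDelta c + pvMpre t)

lemma msuf_cons (c : Char) (t : List Char) :
    pvMsuf (c :: t) = max (pvDelta c + pvDsum t) (pvMsuf t) := rfl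

lemma mpre_cons (c : Char) (t : List Char) :
    pvMpre (c :: t) = max 0 (pvDelta c + pvMpre t) := rfl

lemma msuf_nonneg (l : List Char) : 0 ≤ pvMsuf l := by
  induction l with
  | nil => simp [pvMsuf]
  | cons c t ih => rw [msuf_cons]; omega

lemma mpre_nonneg (l : List Char) : 0 ≤ pvMpre l := by
  induction l with
  | nil => simp [pvMpre]
  | cons c t ih => rw [mpre_cons]; omega

lemma dsum_cons (c : Char) (t : List Char) : pvDsum (c :: t) = pvDelta c + pvDsum t := by
  simp [pvDsum]

lemma dsum_le_msuf (l : List Char) : pvDsum l ≤ pvMsuf l := by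
  induction l with
  | nil => simp [pvDsum, pvMsuf]
  | cons c t ih => rw [dsum_cons, msuf_cons]; exact le_max_left _ _

lemma dsum_append_singleton (l : List Char) (c : Char) :
    pvDsum (l ++ [c]) = pvDsum l + pvDelta c := by
  simp [pvDsum]

lemma stepA_eq_max (a : Int) (c : Char) (h : 0 ≤ a) :
    revengeStepA a c = max (a + pvDelta c) 0 := by
  unfold revengeStepA pvDelta
  by_cases hS : c = 'S'
  · simp [hS]; omega
  · by_cases hR : c = 'R'
    · subst hR
      by_cases hp : a > 0
      · rw [if_pos (by simp [hp])]; simp; omega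
      · rw [if_neg (by simp; omega)]; simp; omega
    · simp [hS, hR]; omega

-- A's clamped fold equals max of (start + total) and the best suffix sum
lemma foldlA_eq (l : List Char) : ∀ a : Int, 0 ≤ a →
    l.foldl revengeStepA a = max (a + pvDsum l) (pvMsuf l) := by
  induction l with
  | nil => intro a h; simp [pvDsum, pvMsuf]; omega
  | cons c t ih =>
    intro a h
    rw [List.foldl_cons, stepA_eq_max a c h, ih _ (le_max_right _ _),
        dsum_cons, msuf_cons]
    have h1 := dsum_le_msuf t
    have h2 := msuf_nonneg t
    omega

-- the best suffix sum of l ++ [c]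
lemma msuf_append_singleton (l : List Char) (c : Char) :
    pvMsuf (l ++ [c]) = max 0 (pvMsuf l + pvDelta c) := by
  induction l with
  | nil => simp [pvMsuf, pvDsum]; omega
  | cons d u ih =>
    rw [List.cons_append, msuf_cons, ih, dsum_append_singleton, msuf_cons]
    have := dsum_le_msuf u
    omega

lemma mpre_eq_msuf_reverse (r : List Char) : pvMpre r = pvMsuf r.reverse := by
  induction r with
  | nil => simp [pvMpre, pvMsuf]
  | cons c t ih =>
    rw [List.reverse_cons, msuf_append_singleton, mpre_cons, ih]
    omega

-- B's early-exit scan detects a positive running sum iff start + best prefix sum > 0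
lemma revengeSuffix_eq (r : List Char) : ∀ s : Int, s ≤ 0 →
    revengeSuffix s r = decide (s + pvMpre r > 0) := by
  induction r with
  | nil => intro s h; simp [revengeSuffix, pvMpre]; omega
  | cons c t ih =>
    intro s h
    unfold revengeSuffix
    have hs' : (if c == 'S' then s + 1 else if c == 'R' then s - 1 else s) = s + pvDelta c := by
      unfold pvDelta; split_ifs <;> omega
    rw [hs', mpre_cons]
    have hpre := mpre_nonneg t
    by_cases hp : s + pvDelta c > 0
    · rw [if_pos hp]
      have hgt : s + max 0 (pvDelta c + pvMpre t) > 0 := by omega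
      simp [hgt]
    · rw [if_neg hp, ih _ (by omega)]
      simp only [decide_eq_decide]
      omega

lemma key (l : List Char) :
    revengeSuffix 0 l.reverse = decide (l.foldl revengeStepA 0 > 0) := by
  rw [revengeSuffix_eq _ 0 le_rfl, mpre_eq_msuf_reverse, List.reverse_reverse,
      foldlA_eq l 0 le_rfl]
  simp only [zero_add, decide_eq_decide]
  have := dsum_le_msuf l
  omega

-- ===== VERDICT (by name: the statement is the Claim_ definition above) =====
theorem revenge_spec : Claim_equal_revenge := by
  intro s _ _
  unfold Spec_revenge revenge revenge_alt
  by_cases hg : (PySem.List.pyGetD s.toList 0 ' ' == 'R' || PySem.List.pyGetD s.toList (-1) ' ' == 'S') = true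
  · simp [hg]
  · simp only [hg, if_false, Bool.false_eq_true, key]
    by_cases hsh : s.toList.foldl revengeStepA 0 > 0 <;> simp [hsh]
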